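-- pv_equiv track=rewrite | github.com/b821213/enforcement-agency-case-management-tools | func_lib.py | regulized
-- ===== SOURCE A (Python) =====
-- def regulized(text):
-- 	to_replace = {
-- 		'true': 'True',
-- 		'false': 'False'
-- 	}
-- 	for key, value in to_replace.items():
-- 		text = text.replace(key, value)
-- 	return text
-- ===== SOURCE B (Python) =====
-- def regulized(text):
--     out = []
--     i = 0
--     n = len(text)
--     while i < n:
--         if text.startswith('true', i):
--             out.append('True')
--             i += 4
--         elif text.startswith('false', i):
--             out.append('False')
--             i += 5
--         else:
--             out.append(text[i])
--             i += 1
--     return ''.join(out)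
-- ===== Notes on version B (the rewrite author's own statement) =====
-- stated objective: alternative
-- what changed: A runs two sequential full-string replace passes driven by a dict of items; B makes a single left-to-right scan that at each position matches one of the two lowercase tokens and substitutes its capitalized form, or copies one character, building the output once.
import Mathlib
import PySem

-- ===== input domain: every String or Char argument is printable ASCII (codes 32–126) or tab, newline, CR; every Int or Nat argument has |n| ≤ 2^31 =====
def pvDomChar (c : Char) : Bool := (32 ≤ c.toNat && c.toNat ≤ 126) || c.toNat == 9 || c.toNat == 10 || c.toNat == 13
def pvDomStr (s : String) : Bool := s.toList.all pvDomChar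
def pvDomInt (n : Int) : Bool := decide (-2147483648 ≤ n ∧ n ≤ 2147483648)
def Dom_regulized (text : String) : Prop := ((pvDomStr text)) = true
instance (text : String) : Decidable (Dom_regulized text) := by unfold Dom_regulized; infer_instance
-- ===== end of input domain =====

-- B replaces A's two sequential full-string .replace passes by one left-to-right scan over the text ('alternative').


-- ===== PORT A =====
-- A builds a two-entry dict and folds str.replace over its items.
def regulized (text : String) : String :=
  let to_replace : PySem.Dict String String :=
    (PySem.Dict.empty.insert "true" "True").insert "false" "False"
  to_replace.items.foldl (fun t kv => PySem.Str.replace t kv.1 kv.2) text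

-- ===== PORT B =====
-- single left-to-right scan: at each position try 'true', then 'false', else copy one char
def pvScan : List Char → List Char
  | [] => []
  | c :: t =>
    if PySem.Chars.startswith (c :: t) ['t','r','u','e'] then
      'T' :: 'r' :: 'u' :: 'e' :: pvScan (t.drop 3)
    else if PySem.Chars.startswith (c :: t) ['f','a','l','s','e'] then
      'F' :: 'a' :: 'l' :: 's' :: 'e' :: pvScan (t.drop 4)
    else c :: pvScan t
termination_by l => l.length
decreasing_by all_goals simp [List.length_drop]

def regulized_alt (text : String) : String := String.ofList (pvScan text.toList)

-- ===== PRECONDITION & SPEC =====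
def Spec_regulized (text : String) (out : String) : Prop := out = regulized_alt text
instance (text : String) (out : String) : Decidable (Spec_regulized text out) := by unfold Spec_regulized; infer_instance

-- ===== CLAIM (what is proved, stated in full; the proofs are below) =====
def Claim_equal_regulized : Prop := ∀ (text : String), Dom_regulized text → Spec_regulized text (regulized text)

-- ===== LEMMAS AND PROOFS =====

-- one-substitution pass of str.replace with a fixed nonempty pattern, as a clean recursion
def repT : List Char → List Char
  | [] => []
  | c :: t =>
    if List.isPrefixOf ['t','r','u','e'] (c :: t) then
      'T' :: 'r' :: 'u' :: 'e' :: repT (t.drop 3)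
    else c :: repT t
termination_by l => l.length
decreasing_by all_goals simp [List.length_drop]

def repF : List Char → List Char
  | [] => []
  | c :: t =>
    if List.isPrefixOf ['f','a','l','s','e'] (c :: t) then
      'F' :: 'a' :: 'l' :: 's' :: 'e' :: repF (t.drop 4)
    else c :: repF t
termination_by l => l.length
decreasing_by all_goals simp [List.length_drop]

theorem repT_pos (rest : List Char) :
    repT ('t' :: 'r' :: 'u' :: 'e' :: rest) = 'T' :: 'r' :: 'u' :: 'e' :: repT rest := by
  rw [repT]; simp [List.isPrefixOf]

theorem repT_neg (c : Char) (t : List Char) (h : List.isPrefixOf ['t','r','u','e'] (c :: t) = false) :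
    repT (c :: t) = c :: repT t := by
  rw [repT, if_neg]; simp [h]

theorem repF_pos (rest : List Char) :
    repF ('f' :: 'a' :: 'l' :: 's' :: 'e' :: rest) = 'F' :: 'a' :: 'l' :: 's' :: 'e' :: repF rest := by
  rw [repF]; simp [List.isPrefixOf]

theorem repF_neg (c : Char) (t : List Char) (h : List.isPrefixOf ['f','a','l','s','e'] (c :: t) = false) :
    repF (c :: t) = c :: repF t := by
  rw [repF, if_neg]; simp [h]

theorem goT_eq (fuel : Nat) (l acc : List Char) (h : l.length ≤ fuel) :
    PySem.Chars.replace.go ['t','r','u','e'] ['T','r','u','e'] fuel l acc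
      = acc.reverse ++ repT l := by
  induction fuel generalizing l acc with
  | zero => cases l with
    | nil => simp [PySem.Chars.replace.go, repT]
    | cons c t => simp at h
  | succ fuel ih =>
    cases l with
    | nil => simp [PySem.Chars.replace.go, repT]
    | cons c t =>
      rw [PySem.Chars.replace.go]
      by_cases hp : List.isPrefixOf ['t','r','u','e'] (c :: t) = true
      · obtain ⟨rest, hrest⟩ := List.isPrefixOf_iff_prefix.mp hp
        simp only [List.cons_append, List.nil_append] at hrest
        obtain ⟨hc1, hc2⟩ := List.cons.inj hrest
        subst hc1; subst hc2
        simp only [hp, if_true, repT_pos]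
        rw [ih]
        · simp
        · simp at h ⊢; omega
      · simp only [hp, Bool.false_eq_true, if_false]
        rw [ih, repT_neg c t (by simp [hp])]
        · simp
        · simp at h; omega

theorem goF_eq (fuel : Nat) (l acc : List Char) (h : l.length ≤ fuel) :
    PySem.Chars.replace.go ['f','a','l','s','e'] ['F','a','l','s','e'] fuel l acc
      = acc.reverse ++ repF l := by
  induction fuel generalizing l acc with
  | zero => cases l with
    | nil => simp [PySem.Chars.replace.go, repF]
    | cons c t => simp at h
  | succ fuel ih =>
    cases l with
    | nil => simp [PySem.Chars.replace.go, repF]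
    | cons c t =>
      rw [PySem.Chars.replace.go]
      by_cases hp : List.isPrefixOf ['f','a','l','s','e'] (c :: t) = true
      · obtain ⟨rest, hrest⟩ := List.isPrefixOf_iff_prefix.mp hp
        simp only [List.cons_append, List.nil_append] at hrest
        obtain ⟨hc1, hc2⟩ := List.cons.inj hrest
        subst hc1; subst hc2
        simp only [hp, if_true, repF_pos]
        rw [ih]
        · simp
        · simp at h ⊢; omega
      · simp only [hp, Bool.false_eq_true, if_false]
        rw [ih, repF_neg c t (by simp [hp])]
        · simp
        · simp at h; omega

theorem replaceT_eq (cs : List Char) :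
    PySem.Chars.replace cs ['t','r','u','e'] ['T','r','u','e'] = repT cs := by
  rw [PySem.Chars.replace]
  simp [goT_eq cs.length cs [] (le_refl _)]

theorem replaceF_eq (cs : List Char) :
    PySem.Chars.replace cs ['f','a','l','s','e'] ['F','a','l','s','e'] = repF cs := by
  rw [PySem.Chars.replace]
  simp [goF_eq cs.length cs [] (le_refl _)]

-- the 'true'→'True' pass cannot create an occurrence of a suffix of 'false' where none was
theorem nf1 (t : List Char) (h : List.isPrefixOf ['e'] t = false) :
    List.isPrefixOf ['e'] (repT t) = false := by
  cases t with
  | nil => simp [repT]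
  | cons c u =>
    rw [repT]
    by_cases hp : List.isPrefixOf ['t','r','u','e'] (c :: u) = true
    · rw [if_pos hp]; simp [List.isPrefixOf]
    · rw [if_neg (by simp [hp])]
      simp [List.isPrefixOf] at h ⊢
      exact h

theorem nf2 (t : List Char) (h : List.isPrefixOf ['s','e'] t = false) :
    List.isPrefixOf ['s','e'] (repT t) = false := by
  cases t with
  | nil => simp [repT]
  | cons c u =>
    rw [repT]
    by_cases hp : List.isPrefixOf ['t','r','u','e'] (c :: u) = true
    · rw [if_pos hp]; simp [List.isPrefixOf]
    · rw [if_neg (by simp [hp])]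
      simp [List.isPrefixOf] at h ⊢
      intro hc
      have := nf1 u
      simp at this
      exact this (h hc)

theorem nf3 (t : List Char) (h : List.isPrefixOf ['l','s','e'] t = false) :
    List.isPrefixOf ['l','s','e'] (repT t) = false := by
  cases t with
  | nil => simp [repT]
  | cons c u =>
    rw [repT]
    by_cases hp : List.isPrefixOf ['t','r','u','e'] (c :: u) = true
    · rw [if_pos hp]; simp [List.isPrefixOf]
    · rw [if_neg (by simp [hp])]
      simp [List.isPrefixOf] at h ⊢
      intro hc
      have := nf2 u
      simp at this
      exact this (h hc)

theorem nf4 (t : List Char) (h : List.isPrefixOf ['a','l','s','e'] t = false) :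
    List.isPrefixOf ['a','l','s','e'] (repT t) = false := by
  cases t with
  | nil => simp [repT]
  | cons c u =>
    rw [repT]
    by_cases hp : List.isPrefixOf ['t','r','u','e'] (c :: u) = true
    · rw [if_pos hp]; simp [List.isPrefixOf]
    · rw [if_neg (by simp [hp])]
      simp [List.isPrefixOf] at h ⊢
      intro hc
      have := nf3 u
      simp at this
      exact this (h hc)

theorem main_scan_aux (n : Nat) : ∀ (cs : List Char), cs.length ≤ n → repF (repT cs) = pvScan cs := by
  induction n with
  | zero =>
    intro cs h
    cases cs with
    | nil => simp [repT, repF, pvScan]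
    | cons c t => simp at h
  | succ n ih =>
    intro cs h
    cases cs with
  | nil => simp [repT, repF, pvScan]
  | cons c t =>
    rw [pvScan]
    by_cases hT : List.isPrefixOf ['t','r','u','e'] (c :: t) = true
    · -- cs starts with 'true'
      obtain ⟨rest, hrest⟩ := List.isPrefixOf_iff_prefix.mp hT
      simp only [List.cons_append, List.nil_append] at hrest
      obtain ⟨hc1, hc2⟩ := List.cons.inj hrest
      subst hc1; subst hc2
      have hS : PySem.Chars.startswith ('t' :: 'r' :: 'u' :: 'e' :: rest) ['t','r','u','e'] = true := by
        rw [PySem.Chars.startswith_iff]; exact ⟨rest, rfl⟩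
      rw [hS, if_pos rfl, repT_pos]
      rw [repF_neg _ _ (by simp [List.isPrefixOf]),
          repF_neg _ _ (by simp [List.isPrefixOf]),
          repF_neg _ _ (by simp [List.isPrefixOf]),
          repF_neg _ _ (by simp [List.isPrefixOf])]
      simp only [List.drop]
      exact congrArg (fun x => 'T' :: 'r' :: 'u' :: 'e' :: x) (ih rest (by simp at h; omega))
    · have hSt : PySem.Chars.startswith (c :: t) ['t','r','u','e'] = false := by
        rw [Bool.eq_false_iff]
        intro hs
        rw [PySem.Chars.startswith_iff] at hs
        exact absurd (List.isPrefixOf_iff_prefix.mpr hs) (by simp [hT])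
      rw [hSt, if_neg (by simp), repT_neg _ _ (by simp [hT])]
      by_cases hF : List.isPrefixOf ['f','a','l','s','e'] (c :: t) = true
      · -- cs starts with 'false'
        obtain ⟨rest, hrest⟩ := List.isPrefixOf_iff_prefix.mp hF
        simp only [List.cons_append, List.nil_append] at hrest
        obtain ⟨hc1, hc2⟩ := List.cons.inj hrest
        subst hc1; subst hc2
        have hS : PySem.Chars.startswith ('f' :: 'a' :: 'l' :: 's' :: 'e' :: rest) ['f','a','l','s','e'] = true := by
          rw [PySem.Chars.startswith_iff]; exact ⟨rest, rfl⟩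
        rw [hS, if_pos rfl]
        rw [repT_neg _ _ (by simp [List.isPrefixOf]),
            repT_neg _ _ (by simp [List.isPrefixOf]),
            repT_neg _ _ (by simp [List.isPrefixOf]),
            repT_neg _ _ (by simp [List.isPrefixOf])]
        rw [repF_pos]
        simp only [List.drop]
        exact congrArg (fun x => 'F' :: 'a' :: 'l' :: 's' :: 'e' :: x) (ih rest (by simp at h; omega))
      · have hSf : PySem.Chars.startswith (c :: t) ['f','a','l','s','e'] = false := by
          rw [Bool.eq_false_iff]
          intro hs
          rw [PySem.Chars.startswith_iff] at hs
          exact absurd (List.isPrefixOf_iff_prefix.mpr hs) (by simp [hF])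
        rw [hSf, if_neg (by simp)]
        have hnotF : List.isPrefixOf ['f','a','l','s','e'] (c :: repT t) = false := by
          by_cases hc : c = 'f'
          · subst hc
            have hF' : List.isPrefixOf ['a','l','s','e'] t = false := by
              rw [Bool.eq_false_iff]
              intro hx
              apply hF
              rw [List.isPrefixOf_iff_prefix] at hx ⊢
              exact List.cons_prefix_cons.mpr ⟨rfl, hx⟩
            have h2 := nf4 t hF'
            rw [Bool.eq_false_iff]
            intro hx
            rw [List.isPrefixOf_iff_prefix, List.cons_prefix_cons] at hx
            exact absurd (List.isPrefixOf_iff_prefix.mpr hx.2) (by simp [h2])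
          · rw [Bool.eq_false_iff]
            intro hx
            rw [List.isPrefixOf_iff_prefix, List.cons_prefix_cons] at hx
            exact hc hx.1.symm
        rw [repF_neg _ _ hnotF]
        exact congrArg (c :: ·) (ih t (by simp at h; omega))

theorem main_scan (cs : List Char) : repF (repT cs) = pvScan cs :=
  main_scan_aux cs.length cs (le_refl _)

-- ===== VERDICT (by name: the statement is the Claim_ definition above) =====
theorem regulized_spec : Claim_equal_regulized := by
  intro text _
  unfold Spec_regulized regulized regulized_alt
  show List.foldl (fun t kv => PySem.Str.replace t kv.1 kv.2) text
      ((PySem.Dict.empty.insert "true" "True").insert "false" "False" :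
        PySem.Dict String String).items = _
  have hitems : ((PySem.Dict.empty.insert "true" "True").insert "false" "False" :
      PySem.Dict String String).items = [("true", "True"), ("false", "False")] := by decide
  rw [hitems]
  simp only [List.foldl]
  rw [PySem.Str.replace, PySem.Str.replace]
  simp only [String.toList_ofList]
  rw [show "true".toList = ['t','r','u','e'] from rfl, show "True".toList = ['T','r','u','e'] from rfl,
      show "false".toList = ['f','a','l','s','e'] from rfl, show "False".toList = ['F','a','l','s','e'] from rfl,
      replaceT_eq, replaceF_eq, main_scan]
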